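-- pv_equiv track=rewrite | github.com/TayDa64/multimodal-ai-music-gen | multimodal_gen/agents/performers/bassist.py | _get_scale_notes_for_bass
-- ===== SOURCE A (Python) =====
-- from typing import List, Optional, Dict, Any, Tuple
--
-- def _get_scale_notes_for_bass(
--     root_pc: int, key: str, scale: str = "major",
--     register: Optional[Tuple[int, int]] = None,
-- ) -> List[int]:
--     """
--     Return MIDI notes in the bass register that belong to the scale.
--
--     Args:
--         root_pc: Root pitch class (0-11).
--         key: Key string (e.g. "C", "Eb").
--         scale: Scale type — "major", "minor", "dorian", "mixolydian".
--         register: Optional (low, high) MIDI range. Defaults to (28, 55).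
--
--     Returns:
--         Sorted list of MIDI note numbers in the register range.
--     """
--     lo, hi = register if register else (28, 55)
--     _SCALE_INTERVALS = {
--         "major":      [0, 2, 4, 5, 7, 9, 11],
--         "minor":      [0, 2, 3, 5, 7, 8, 10],
--         "dorian":     [0, 2, 3, 5, 7, 9, 10],
--         "mixolydian": [0, 2, 4, 5, 7, 9, 10],
--     }
--     intervals = _SCALE_INTERVALS.get(scale, _SCALE_INTERVALS["major"])
--     pitch_classes = set((root_pc + iv) % 12 for iv in intervals)
--     return sorted(n for n in range(lo, hi + 1) if n % 12 in pitch_classes)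
-- ===== SOURCE B (Python) =====
-- from typing import List, Optional, Tuple
--
-- def _get_scale_notes_for_bass(
--     root_pc: int, key: str, scale: str = "major",
--     register: Optional[Tuple[int, int]] = None,
-- ) -> List[int]:
--     """Enumerate scale members directly, octave by octave, already in order."""
--     lo, hi = register if register else (28, 55)
--     _SCALE_INTERVALS = {
--         "major":      [0, 2, 4, 5, 7, 9, 11],
--         "minor":      [0, 2, 3, 5, 7, 8, 10],
--         "dorian":     [0, 2, 3, 5, 7, 9, 10],
--         "mixolydian": [0, 2, 4, 5, 7, 9, 10],
--     }
--     intervals = _SCALE_INTERVALS.get(scale, _SCALE_INTERVALS["major"])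
--     pcs = sorted(set((root_pc + iv) % 12 for iv in intervals))
--     out = []
--     for k in range(lo // 12, hi // 12 + 1):
--         base = 12 * k
--         for pc in pcs:
--             n = base + pc
--             if lo <= n <= hi:
--                 out.append(n)
--     return out
-- ===== Notes on version B (the rewrite author's own statement) =====
-- stated objective: alternative
-- what changed: Instead of filtering every semitone of range(lo, hi+1) against the pitch-class set and sorting, B sorts the (at most 7) pitch classes once and emits note = 12*k + pc octave by octave, producing the list already in ascending order with no final sort.
import Mathlib
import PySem

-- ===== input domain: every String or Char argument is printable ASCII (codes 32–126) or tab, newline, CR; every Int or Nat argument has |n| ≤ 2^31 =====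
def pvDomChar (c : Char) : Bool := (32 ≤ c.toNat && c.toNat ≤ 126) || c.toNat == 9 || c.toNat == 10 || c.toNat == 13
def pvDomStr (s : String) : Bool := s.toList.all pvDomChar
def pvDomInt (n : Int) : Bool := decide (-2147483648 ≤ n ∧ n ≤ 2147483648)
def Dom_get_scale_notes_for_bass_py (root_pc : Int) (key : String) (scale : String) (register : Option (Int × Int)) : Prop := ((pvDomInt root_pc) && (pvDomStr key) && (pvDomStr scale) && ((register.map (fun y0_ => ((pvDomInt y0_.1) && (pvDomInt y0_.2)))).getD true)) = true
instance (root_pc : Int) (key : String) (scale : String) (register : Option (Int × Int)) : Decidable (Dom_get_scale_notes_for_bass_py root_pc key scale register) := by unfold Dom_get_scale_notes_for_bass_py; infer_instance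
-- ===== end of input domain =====

-- B enumerates scale members directly per octave (emitting them in ascending order, no sort)
-- instead of filtering every semitone of the register and sorting; objective: alternative.

-- shared first lines of both versions: the scale-interval table lookup
def pvIntervals (scale : String) : List Int :=
  let d : PySem.Dict String (List Int) := PySem.Dict.ofList
    [("major", [0, 2, 4, 5, 7, 9, 11]),
     ("minor", [0, 2, 3, 5, 7, 8, 10]),
     ("dorian", [0, 2, 3, 5, 7, 9, 10]),
     ("mixolydian", [0, 2, 4, 5, 7, 9, 10])]
  (d.get? scale).getD [0, 2, 4, 5, 7, 9, 11]

-- ===== PORT A =====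
def get_scale_notes_for_bass_py (root_pc : Int) (key : String) (scale : String) (register : Option (Int × Int)) : List Int :=
  let p := register.getD (28, 55)
  let lo := p.1
  let hi := p.2
  let intervals := pvIntervals scale
  let pitch_classes : PySem.Set Int :=
    PySem.Set.ofList (intervals.map (fun iv => PySem.Int.mod (root_pc + iv) 12))
  PySem.List.sorted
    ((PySem.List.pyRange lo (hi + 1) 1).filter
      (fun n => PySem.Set.contains pitch_classes (PySem.Int.mod n 12)))
    (fun x => x) false

-- ===== PORT B =====
def get_scale_notes_for_bass_py_alt (root_pc : Int) (key : String) (scale : String) (register : Option (Int × Int)) : List Int :=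
  let p := register.getD (28, 55)
  let lo := p.1
  let hi := p.2
  let intervals := pvIntervals scale
  let pcs : List Int :=
    PySem.List.sorted
      (PySem.Set.ofList (intervals.map (fun iv => PySem.Int.mod (root_pc + iv) 12)))
      (fun x => x) false
  (PySem.List.pyRange (PySem.Int.floordiv lo 12) (PySem.Int.floordiv hi 12 + 1) 1).foldl
    (fun out k =>
      let base := 12 * k
      pcs.foldl
        (fun out pc =>
          let n := base + pc
          if lo ≤ n ∧ n ≤ hi then out ++ [n] else out)
        out)
    []

-- ===== PRECONDITION & SPEC =====
def Spec_get_scale_notes_for_bass_py (root_pc : Int) (key : String) (scale : String) (register : Option (Int × Int)) (out : List Int) : Prop := out = get_scale_notes_for_bass_py_alt root_pc key scale register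
instance (root_pc : Int) (key : String) (scale : String) (register : Option (Int × Int)) (out : List Int) : Decidable (Spec_get_scale_notes_for_bass_py root_pc key scale register out) := by unfold Spec_get_scale_notes_for_bass_py; infer_instance

-- ===== CLAIM (what is proved, stated in full; the proofs are below) =====
def Claim_equal_get_scale_notes_for_bass_py : Prop := ∀ (root_pc : Int) (key : String) (scale : String) (register : Option (Int × Int)), Dom_get_scale_notes_for_bass_py root_pc key scale register → Spec_get_scale_notes_for_bass_py root_pc key scale register (get_scale_notes_for_bass_py root_pc key scale register)

-- ===== LEMMAS AND PROOFS =====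

theorem pv_key (lo hi : Int) (pcl : List Int)
    (hb : ∀ x ∈ pcl, 0 ≤ x ∧ x < 12) :
    PySem.List.sorted ((PySem.List.pyRange lo (hi + 1) 1).filter
        (fun n => PySem.Set.contains (PySem.Set.ofList pcl) (PySem.Int.mod n 12)))
      (fun x => x) false =
    (PySem.List.pyRange (PySem.Int.floordiv lo 12) (PySem.Int.floordiv hi 12 + 1) 1).foldl
      (fun out k =>
        (PySem.List.sorted (PySem.Set.ofList pcl) (fun x => x) false).foldl
          (fun out pc => if lo ≤ 12 * k + pc ∧ 12 * k + pc ≤ hi then out ++ [12 * k + pc] else out)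
          out)
      [] := by
  have h12 : (0:Int) < 12 := by norm_num
  set S := PySem.List.sorted (PySem.Set.ofList pcl) (fun x => x) false with hSdef
  have hSmem : ∀ x, x ∈ S ↔ x ∈ pcl := by
    intro x; rw [hSdef, PySem.List.mem_sorted, PySem.Set.mem_ofList]
  have hSpair : S.Pairwise (· < ·) := hSdef ▸ PySem.List.sorted_ofList_pairwise_lt pcl
  have hSb : ∀ x ∈ S, 0 ≤ x ∧ x < 12 := fun x hx => hb x ((hSmem x).1 hx)
  -- rewrite the RHS double fold into a flatMap
  have hinner : ∀ (out : List Int) (k : Int), k ∈ PySem.List.pyRange (PySem.Int.floordiv lo 12) (PySem.Int.floordiv hi 12 + 1) 1 →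
      S.foldl (fun out pc => if lo ≤ 12 * k + pc ∧ 12 * k + pc ≤ hi then out ++ [12 * k + pc] else out) out
      = out ++ (S.filter (fun pc => decide (lo ≤ 12 * k + pc ∧ 12 * k + pc ≤ hi))).map (fun pc => 12 * k + pc) := by
    intro out k _
    exact PySem.List.foldl_append_ite (p := fun pc => lo ≤ 12 * k + pc ∧ 12 * k + pc ≤ hi)
      (f := fun pc => 12 * k + pc) (l := S) (acc := out)
  have h2 := PySem.List.foldl_congr_mem
      (l := PySem.List.pyRange (PySem.Int.floordiv lo 12) (PySem.Int.floordiv hi 12 + 1) 1)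
      (init := ([] : List Int))
      (f := fun out k => S.foldl (fun out pc => if lo ≤ 12 * k + pc ∧ 12 * k + pc ≤ hi then out ++ [12 * k + pc] else out) out)
      (g := fun out k => out ++ (S.filter (fun pc => decide (lo ≤ 12 * k + pc ∧ 12 * k + pc ≤ hi))).map (fun pc => 12 * k + pc))
      hinner
  rw [h2, PySem.List.foldl_append_eq_flatMap, List.nil_append]
  apply PySem.List.sorted_eq_of_perm_of_pairwise_lt
  · -- Perm
    apply (List.perm_ext_iff_of_nodup ?_ ?_).mpr
    · intro a
      simp only [List.mem_flatMap, List.mem_map, List.mem_filter, PySem.List.mem_pyRange_one,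
        decide_eq_true_eq]
      constructor
      · rintro ⟨k, hk, pc, ⟨hpcS, hbnd⟩, rfl⟩
        have hpb := hSb pc hpcS
        have hmod : PySem.Int.mod (12 * k + pc) 12 = pc := by
          rw [PySem.Int.mod_eq_emod_of_pos h12]; omega
        refine ⟨⟨hbnd.1, by omega⟩, ?_⟩
        rw [hmod]
        exact (PySem.Set.contains_iff _ _).mpr ((PySem.Set.mem_ofList _ _).mpr ((hSmem pc).1 hpcS))
      · rintro ⟨⟨hla, hah⟩, hq⟩
        have hpc : PySem.Int.mod a 12 ∈ pcl :=
          (PySem.Set.mem_ofList _ _).mp ((PySem.Set.contains_iff _ _).mp hq)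
        have hpcS : PySem.Int.mod a 12 ∈ S := (hSmem _).mpr hpc
        have hmb := hSb _ hpcS
        refine ⟨PySem.Int.floordiv a 12, ?_, PySem.Int.mod a 12, ⟨hpcS, ?_⟩, ?_⟩ <;>
          simp only [PySem.Int.floordiv_eq_ediv_of_pos h12, PySem.Int.mod_eq_emod_of_pos h12] at * <;>
          omega
    · -- Nodup of the flatMap: it is Pairwise (<)
      refine List.Pairwise.imp (fun h => ne_of_lt h) ?_
      rw [List.pairwise_flatMap]
      constructor
      · intro k _
        exact ((hSpair.filter _).map _ (fun a b h => by omega))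
      · refine (PySem.List.pairwise_lt_pyRange_one _ _).imp ?_
        intro k k' hkk x hx y hy
        simp only [List.mem_map, List.mem_filter] at hx hy
        obtain ⟨pc, ⟨hpcS, _⟩, rfl⟩ := hx
        obtain ⟨pc', ⟨hpcS', _⟩, rfl⟩ := hy
        have h1 := hSb pc hpcS; have h2 := hSb pc' hpcS'
        omega
    · exact (PySem.List.nodup_pyRange_one _ _).filter _
  · -- Pairwise (<) of the flatMap
    rw [List.pairwise_flatMap]
    constructor
    · intro k _
      exact ((hSpair.filter _).map _ (fun a b h => by omega))
    · refine (PySem.List.pairwise_lt_pyRange_one _ _).imp ?_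
      intro k k' hkk x hx y hy
      simp only [List.mem_map, List.mem_filter] at hx hy
      obtain ⟨pc, ⟨hpcS, _⟩, rfl⟩ := hx
      obtain ⟨pc', ⟨hpcS', _⟩, rfl⟩ := hy
      have h1 := hSb pc hpcS; have h2 := hSb pc' hpcS'
      omega

theorem pv_main (root_pc : Int) (key : String) (scale : String) (register : Option (Int × Int)) :
    get_scale_notes_for_bass_py root_pc key scale register =
      get_scale_notes_for_bass_py_alt root_pc key scale register := by
  unfold get_scale_notes_for_bass_py get_scale_notes_for_bass_py_alt
  exact pv_key (register.getD (28, 55)).1 (register.getD (28, 55)).2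
    ((pvIntervals scale).map (fun iv => PySem.Int.mod (root_pc + iv) 12))
    (by
      intro x hx
      simp only [List.mem_map] at hx
      obtain ⟨iv, _, rfl⟩ := hx
      exact ⟨PySem.Int.mod_nonneg _ (by norm_num), PySem.Int.mod_lt _ (by norm_num)⟩)

-- ===== VERDICT (by name: the statement is the Claim_ definition above) =====
theorem get_scale_notes_for_bass_py_spec : Claim_equal_get_scale_notes_for_bass_py := by
  intro root_pc key scale register _
  unfold Spec_get_scale_notes_for_bass_py
  exact pv_main root_pc key scale register
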